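-- pv_equiv track=rewrite | github.com/davidbaines/sami_leides | data/osis_tran.py | split_at_key
-- ===== SOURCE A (Python) =====
-- from collections import OrderedDict
--
-- def split_at_key(split_key, od):
--     lo = OrderedDict()
--     hi = OrderedDict()
--     tgt = lo
--     for key, v in od.items():
--         if key.startswith(split_key):
--             tgt = hi
--         tgt[key] = v
--     return lo, hi
-- ===== SOURCE B (Python) =====
-- from collections import OrderedDict
--
-- def split_at_key(split_key, od):
--     items = list(od.items())
--     i = len(items)
--     for j, (key, _v) in enumerate(items):
--         if key.startswith(split_key):
--             i = j
--             break
--     return OrderedDict(items[:i]), OrderedDict(items[i:])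
-- ===== Notes on version B (the rewrite author's own statement) =====
-- stated objective: simpler
-- what changed: Replaces the per-item target-switching loop with a boundary search (index of the first key starting with split_key) followed by two slice-based OrderedDict constructions.
import Mathlib
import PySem

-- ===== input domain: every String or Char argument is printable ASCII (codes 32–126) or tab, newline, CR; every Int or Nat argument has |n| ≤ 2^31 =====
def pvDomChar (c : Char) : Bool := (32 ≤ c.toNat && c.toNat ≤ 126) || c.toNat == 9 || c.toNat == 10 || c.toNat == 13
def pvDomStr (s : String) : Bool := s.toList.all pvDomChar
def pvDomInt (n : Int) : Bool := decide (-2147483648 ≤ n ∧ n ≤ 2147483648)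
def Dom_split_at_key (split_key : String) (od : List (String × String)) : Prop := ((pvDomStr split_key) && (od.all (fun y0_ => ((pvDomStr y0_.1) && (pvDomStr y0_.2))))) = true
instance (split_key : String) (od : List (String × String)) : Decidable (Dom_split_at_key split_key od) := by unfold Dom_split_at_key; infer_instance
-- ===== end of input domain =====

-- ===== PORT A =====
-- B replaces A's target-switching loop by a boundary search plus two slice constructions (objective: simpler).
-- step of A's for-loop: check startswith (switching the target once), then assign into the current target dict
def pvStepA (split_key : String)
    (st : PySem.Dict String String × PySem.Dict String String × Bool)
    (kv : String × String) :
    PySem.Dict String String × PySem.Dict String String × Bool :=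
  let t := st.2.2 || PySem.Str.startswith kv.1 split_key
  if t then (st.1, st.2.1.insert kv.1 kv.2, t)
  else (st.1.insert kv.1 kv.2, st.2.1, t)

def split_at_key (split_key : String) (od : List (String × String)) : (List (String × String)) × (List (String × String)) :=
  let r := od.foldl (pvStepA split_key) (PySem.Dict.empty, PySem.Dict.empty, false)
  (r.1.items, r.2.1.items)

-- ===== PORT B =====
-- B's loop: enumerate with break at the first matching key; index defaults to len(items)
def pvBoundary (split_key : String) : List (String × String) → Nat
  | [] => 0
  | kv :: rest =>
    if PySem.Str.startswith kv.1 split_key then 0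
    else pvBoundary split_key rest + 1

def split_at_key_alt (split_key : String) (od : List (String × String)) : (List (String × String)) × (List (String × String)) :=
  let i := pvBoundary split_key od
  ((PySem.Dict.ofList (od.take i)).items, (PySem.Dict.ofList (od.drop i)).items)

-- ===== PRECONDITION & SPEC =====
def Spec_split_at_key (split_key : String) (od : List (String × String)) (out : (List (String × String)) × (List (String × String))) : Prop := out = split_at_key_alt split_key od
instance (split_key : String) (od : List (String × String)) (out : (List (String × String)) × (List (String × String))) : Decidable (Spec_split_at_key split_key od out) := by unfold Spec_split_at_key; infer_instance

-- ===== CLAIM (what is proved, stated in full; the proofs are below) =====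
def Claim_equal_split_at_key : Prop := ∀ (split_key : String) (od : List (String × String)), Dom_split_at_key split_key od → Spec_split_at_key split_key od (split_at_key split_key od)

-- ===== LEMMAS AND PROOFS =====

lemma foldA_true (split_key : String) :
    ∀ (l : List (String × String)) (lo hi : PySem.Dict String String),
      l.foldl (pvStepA split_key) (lo, hi, true)
        = (lo, l.foldl (fun d kv => d.insert kv.1 kv.2) hi, true) := by
  intro l
  induction l with
  | nil => intro lo hi; rfl
  | cons kv rest ih =>
    intro lo hi
    simp only [List.foldl_cons, pvStepA, Bool.true_or]
    exact ih lo (hi.insert kv.1 kv.2)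

lemma foldA_false (split_key : String) :
    ∀ (l : List (String × String)) (lo hi : PySem.Dict String String),
      l.foldl (pvStepA split_key) (lo, hi, false)
        = ((l.take (pvBoundary split_key l)).foldl (fun d kv => d.insert kv.1 kv.2) lo,
           (l.drop (pvBoundary split_key l)).foldl (fun d kv => d.insert kv.1 kv.2) hi,
           decide (pvBoundary split_key l < l.length)) := by
  intro l
  induction l with
  | nil => intro lo hi; simp [pvBoundary]
  | cons kv rest ih =>
    intro lo hi
    by_cases h : PySem.Str.startswith kv.1 split_key = true
    · simp only [List.foldl_cons, pvStepA, Bool.false_or, h, if_true, pvBoundary,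
        List.take_zero, List.drop_zero, List.foldl_nil, List.length_cons]
      rw [foldA_true]
      simp
    · have hb : PySem.Str.startswith kv.1 split_key = false := by
        simpa using h
      simp only [List.foldl_cons, pvStepA, hb, Bool.false_or, Bool.false_eq_true, if_false,
        pvBoundary, List.take_succ_cons, List.drop_succ_cons, List.length_cons]
      rw [ih]
      simp

-- ===== VERDICT (by name: the statement is the Claim_ definition above) =====
theorem split_at_key_spec : Claim_equal_split_at_key := by
  intro split_key od _
  unfold Spec_split_at_key split_at_key split_at_key_alt
  rw [foldA_false]
  rfl
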